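-- pv_equiv track=rewrite | github.com/kimhhyeonjin/Algorithm | 프로그래머스/1/42840. 모의고사/모의고사.py | solution
-- ===== SOURCE A (Python) =====
-- def solution(answers):
--     answer = []
--     s1 = [1, 2, 3, 4, 5]
--     s2 = [2, 1, 2, 3, 2, 4, 2, 5]
--     s3 = [3, 3, 1, 1, 2, 2, 4, 4, 5, 5]
--
--     score = [0, 0, 0]
--     for i in range(len(answers)):
--         if s1[i % len(s1)] == answers[i]:
--             score[0] += 1
--         if s2[i % len(s2)] == answers[i]:
--             score[1] += 1
--         if s3[i % len(s3)] == answers[i]: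
--             score[2] += 1
--
--     max_s = max(score)
--     for j in range(3):
--         if score[j] == max_s:
--             answer.append(j+1)
--
--     return answer
-- ===== SOURCE B (Python) =====
-- def solution(answers):
--     patterns = [
--         [1, 2, 3, 4, 5],
--         [2, 1, 2, 3, 2, 4, 2, 5],
--         [3, 3, 1, 1, 2, 2, 4, 4, 5, 5],
--     ]
--     scores = []
--     for pat in patterns:
--         c = 0
--         rest = answers
--         while rest:
--             c += sum(p == a for p, a in zip(pat, rest))
--             rest = rest[len(pat):]
--         scores.append(c)
--     best = max(scores)
--     return [k + 1 for k, s in enumerate(scores) if s == best]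
-- ===== Notes on version B (the rewrite author's own statement) =====
-- stated objective: alternative
-- what changed: Replaces A's single indexed loop with modular pattern lookups (pat[i % len] inside one interleaved pass updating three counters) by index-free chunked scanning: for each pattern separately, the answer list is consumed in slices of the pattern's length, each chunk zipped against the whole pattern and the equalities summed, so no index variable and no modulo arithmetic occur at all.
import Mathlib
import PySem

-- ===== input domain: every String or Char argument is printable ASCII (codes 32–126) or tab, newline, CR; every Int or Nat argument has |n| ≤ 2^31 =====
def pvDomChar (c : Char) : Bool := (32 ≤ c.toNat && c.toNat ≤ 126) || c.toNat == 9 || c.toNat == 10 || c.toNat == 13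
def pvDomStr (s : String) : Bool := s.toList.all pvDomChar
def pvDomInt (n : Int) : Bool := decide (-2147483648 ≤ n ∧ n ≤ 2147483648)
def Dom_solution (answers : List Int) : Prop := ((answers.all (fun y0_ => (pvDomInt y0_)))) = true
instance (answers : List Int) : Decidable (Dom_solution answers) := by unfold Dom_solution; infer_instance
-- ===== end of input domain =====

-- B replaces A's indexed modular loop by per-pattern chunked zip-scans (no index, no modulo): alternative algorithm, same cost.


-- ===== PORT A =====
-- score[0], score[1], score[2] are carried as a triple; one loop over range(len(answers)).
def solution (answers : List Int) : List Int :=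
  let s1 : List Int := [1, 2, 3, 4, 5]
  let s2 : List Int := [2, 1, 2, 3, 2, 4, 2, 5]
  let s3 : List Int := [3, 3, 1, 1, 2, 2, 4, 4, 5, 5]
  let score :=
    (PySem.List.pyRange 0 (answers.length : Int) 1).foldl
      (fun (sc : Int × Int × Int) i =>
        let a := PySem.List.pyGetD answers i 0
        let sc := if PySem.List.pyGetD s1 (PySem.Int.mod i (s1.length : Int)) 0 = a
                  then (sc.1 + 1, sc.2.1, sc.2.2) else sc
        let sc := if PySem.List.pyGetD s2 (PySem.Int.mod i (s2.length : Int)) 0 = a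
                  then (sc.1, sc.2.1 + 1, sc.2.2) else sc
        if PySem.List.pyGetD s3 (PySem.Int.mod i (s3.length : Int)) 0 = a
        then (sc.1, sc.2.1, sc.2.2 + 1) else sc)
      (0, 0, 0)
  let max_s := (PySem.List.max? [score.1, score.2.1, score.2.2] (fun v => v)).getD 0
  (PySem.List.pyRange 0 3 1).foldl
    (fun ans j =>
      if PySem.List.pyGetD [score.1, score.2.1, score.2.2] j 0 = max_s
      then ans ++ [j + 1] else ans)
    []

-- ===== PORT B =====
-- c += sum(p == a for p, a in zip(pat, rest))
def zipCount (pat xs : List Int) : Int :=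
  ((pat.zip xs).map (fun pa => if pa.1 = pa.2 then (1 : Int) else 0)).sum

-- while rest: c += zipCount; rest = rest[len(pat):]
-- (the 'pat = []' branch is a totality guard only: Python's while-loop would not terminate there;
--  both callers pass nonempty literal patterns)
def countChunks (pat xs : List Int) : Int :=
  if xs = [] then 0
  else if pat = [] then 0
  else zipCount pat xs + countChunks pat (PySem.List.slice xs (some (pat.length : Int)) none)
termination_by xs.length
decreasing_by
  rw [PySem.List.slice_from_natCast]
  have hx : 0 < xs.length := List.length_pos_iff.mpr (by assumption)
  have hp : 0 < pat.length := List.length_pos_iff.mpr (by assumption)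
  simp only [List.length_drop]
  omega

def solution_alt (answers : List Int) : List Int :=
  let patterns : List (List Int) :=
    [[1, 2, 3, 4, 5], [2, 1, 2, 3, 2, 4, 2, 5], [3, 3, 1, 1, 2, 2, 4, 4, 5, 5]]
  let scores := patterns.foldl (fun acc pat => acc ++ [countChunks pat answers]) []
  let best := (PySem.List.max? scores (fun v => v)).getD 0
  ((PySem.List.enumerate scores 0).filter (fun ks => ks.2 = best)).map (fun ks => ks.1 + 1)

-- ===== PRECONDITION & SPEC =====
def Spec_solution (answers : List Int) (out : List Int) : Prop := out = solution_alt answers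
instance (answers : List Int) (out : List Int) : Decidable (Spec_solution answers out) := by unfold Spec_solution; infer_instance

-- ===== CLAIM (what is proved, stated in full; the proofs are below) =====
def Claim_equal_solution : Prop := ∀ (answers : List Int), Dom_solution answers → Spec_solution answers (solution answers)

-- ===== LEMMAS AND PROOFS =====

-- common counting spec, used only in the proofs
def scoreOf (pat : List Int) (answers : List Int) : Int :=
  (((PySem.List.enumerate answers 0).filter
      (fun ia => PySem.List.pyGetD pat (PySem.Int.mod ia.1 (pat.length : Int)) 0 = ia.2)).length : Int)

theorem enumerate_append_singleton (t : List Int) (a : Int) (s : Int) :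
    PySem.List.enumerate (t ++ [a]) s = PySem.List.enumerate t s ++ [(s + (t.length : Int), a)] := by
  rw [PySem.List.enumerate_append]
  simp [PySem.List.enumerate_cons, PySem.List.enumerate_nil]

-- A's interleaved counting loop equals three per-pattern counts.
theorem loop_count (s1 s2 s3 : List Int) (xs : List Int) (x y z : Int) :
    (PySem.List.pyRange 0 (xs.length : Int) 1).foldl
      (fun (sc : Int × Int × Int) i =>
        let a := PySem.List.pyGetD xs i 0
        let sc := if PySem.List.pyGetD s1 (PySem.Int.mod i (s1.length : Int)) 0 = a
                  then (sc.1 + 1, sc.2.1, sc.2.2) else sc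
        let sc := if PySem.List.pyGetD s2 (PySem.Int.mod i (s2.length : Int)) 0 = a
                  then (sc.1, sc.2.1 + 1, sc.2.2) else sc
        if PySem.List.pyGetD s3 (PySem.Int.mod i (s3.length : Int)) 0 = a
        then (sc.1, sc.2.1, sc.2.2 + 1) else sc)
      (x, y, z)
    = (x + scoreOf s1 xs, y + scoreOf s2 xs, z + scoreOf s3 xs) := by
  induction xs using List.reverseRecOn generalizing x y z with
  | nil => simp [scoreOf, PySem.List.enumerate, PySem.List.pyRange_one_eq_nil]
  | append_singleton t a ih =>
    have hlen : ((t ++ [a]).length : Int) = (t.length : Int) + 1 := by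
      simp
    rw [hlen, PySem.List.pyRange_one_succ_right (by positivity), List.foldl_append]
    have hstep : (PySem.List.pyRange 0 (t.length : Int) 1).foldl
        (fun (sc : Int × Int × Int) i =>
          let av := PySem.List.pyGetD (t ++ [a]) i 0
          let sc := if PySem.List.pyGetD s1 (PySem.Int.mod i (s1.length : Int)) 0 = av
                    then (sc.1 + 1, sc.2.1, sc.2.2) else sc
          let sc := if PySem.List.pyGetD s2 (PySem.Int.mod i (s2.length : Int)) 0 = av
                    then (sc.1, sc.2.1 + 1, sc.2.2) else sc
          if PySem.List.pyGetD s3 (PySem.Int.mod i (s3.length : Int)) 0 = av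
          then (sc.1, sc.2.1, sc.2.2 + 1) else sc)
        (x, y, z)
        = (x + scoreOf s1 t, y + scoreOf s2 t, z + scoreOf s3 t) := by
      rw [← ih x y z]
      apply PySem.List.foldl_congr_mem
      intro acc i hi
      have hmem := (PySem.List.mem_pyRange_one).1 hi
      obtain ⟨k, hk⟩ := Int.eq_ofNat_of_zero_le hmem.1
      have hklt : k < t.length := by
        have := hmem.2; rw [hk] at this; exact_mod_cast this
      have hgg : PySem.List.pyGetD (t ++ [a]) i 0 = PySem.List.pyGetD t i 0 := by
        rw [hk, PySem.List.pyGetD_natCast, PySem.List.pyGetD_natCast,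
          List.getD_eq_getElem?_getD, List.getD_eq_getElem?_getD,
          List.getElem?_append_left hklt]
      rw [hgg]
    rw [hstep]
    -- the last iteration, index t.length, reads a
    have hlast : PySem.List.pyGetD (t ++ [a]) (t.length : Int) 0 = a := by
      rw [PySem.List.pyGetD_natCast, List.getD_eq_getElem?_getD,
        List.getElem?_append_right (le_refl _)]
      simp
    simp only [List.foldl_cons, List.foldl_nil, hlast]
    have hsc : ∀ p : List Int, scoreOf p (t ++ [a]) =
        scoreOf p t + (if PySem.List.pyGetD p (PySem.Int.mod (t.length : Int) (p.length : Int)) 0 = a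
                       then 1 else 0) := by
      intro p
      unfold scoreOf
      rw [enumerate_append_singleton, List.filter_append]
      simp only [zero_add, List.length_append, List.filter_cons, List.filter_nil]
      by_cases h : PySem.List.pyGetD p (PySem.Int.mod (t.length : Int) (p.length : Int)) 0 = a
      · rw [if_pos (by simpa using h), if_pos h]
        push_cast [List.length_cons, List.length_nil]; ring
      · rw [if_neg (by simpa using h), if_neg h]
        push_cast [List.length_cons, List.length_nil]; ring
    rw [hsc, hsc, hsc]
    split_ifs <;> simp only [Prod.mk.injEq] <;> refine ⟨by ring, by ring, by ring⟩

-- zipCount is a filter-count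
theorem zipCount_eq (pat xs : List Int) :
    zipCount pat xs = (((pat.zip xs).filter (fun pa => pa.1 = pa.2)).length : Int) := by
  unfold zipCount
  induction (pat.zip xs) with
  | nil => simp
  | cons p t ih =>
    simp only [List.map_cons, List.sum_cons, List.filter_cons, ih]
    by_cases h : p.1 = p.2
    · rw [if_pos h, if_pos (by simpa using h)]
      push_cast [List.length_cons]; ring
    · rw [if_neg h, if_neg (by simpa using h)]
      simp

-- an initial segment shorter than the pattern: modular lookup is plain zipping
theorem take_part (q : List Int) : ∀ (c : List Int) (s : Nat), s + c.length ≤ q.length →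
    ((PySem.List.enumerate c (s : Int)).filter
        (fun ia => PySem.List.pyGetD q (PySem.Int.mod ia.1 (q.length : Int)) 0 = ia.2)).length
      = (((q.drop s).zip c).filter (fun pa => pa.1 = pa.2)).length := by
  intro c
  induction c with
  | nil => intro s h; simp [PySem.List.enumerate_nil]
  | cons a c' ih =>
    intro s h
    have hs : s < q.length := by simp at h; omega
    rw [PySem.List.enumerate_cons]
    have hdrop : q.drop s = q[s] :: q.drop (s + 1) := List.drop_eq_getElem_cons hs
    have hmod : PySem.Int.mod (s : Int) (q.length : Int) = ((s % q.length : Nat) : Int) :=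
      PySem.Int.mod_natCast s q.length
    have hget : PySem.List.pyGetD q ((s : Int)) 0 = q[s] := by
      rw [PySem.List.pyGetD_natCast, List.getD_eq_getElem?_getD, List.getElem?_eq_getElem hs]
      rfl
    have hcast : (s : Int) + 1 = ((s + 1 : Nat) : Int) := by push_cast; ring
    rw [hdrop, List.zip_cons_cons, List.filter_cons, List.filter_cons]
    have hPred : (PySem.List.pyGetD q (PySem.Int.mod (s : Int) (q.length : Int)) 0 = a) ↔ (q[s] = a) := by
      rw [hmod, Nat.mod_eq_of_lt hs, hget]
    have hih := ih (s + 1) (by simp at h ⊢; omega)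
    by_cases hqa : q[s] = a
    · rw [if_pos (by simpa using (hPred.mpr hqa)), if_pos (by simpa using hqa)]
      simp only [List.length_cons, hcast, hih]
    · rw [if_neg (by simpa using (fun hh => hqa (hPred.mp hh))), if_neg (by simpa using hqa)]
      simpa only [hcast] using hih

-- shifting all indices by the pattern length does not change the modular count
theorem shift_part (q : List Int) (hq : q ≠ []) : ∀ (ys : List Int) (s : Int),
    ((PySem.List.enumerate ys (s + (q.length : Int))).filter
        (fun ia => PySem.List.pyGetD q (PySem.Int.mod ia.1 (q.length : Int)) 0 = ia.2)).length
      = ((PySem.List.enumerate ys s).filter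
        (fun ia => PySem.List.pyGetD q (PySem.Int.mod ia.1 (q.length : Int)) 0 = ia.2)).length := by
  intro ys
  induction ys with
  | nil => intro s; simp [PySem.List.enumerate_nil]
  | cons a ys' ih =>
    intro s
    have hL : (0 : Int) < (q.length : Int) := by
      exact_mod_cast List.length_pos_iff.mpr hq
    have hmod : PySem.Int.mod (s + (q.length : Int)) (q.length : Int)
        = PySem.Int.mod s (q.length : Int) := by
      rw [PySem.Int.mod_eq_emod_of_pos hL, PySem.Int.mod_eq_emod_of_pos hL,
        Int.add_emod_right]
    rw [PySem.List.enumerate_cons, PySem.List.enumerate_cons, List.filter_cons, List.filter_cons]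
    have hshift : s + (q.length : Int) + 1 = (s + 1) + (q.length : Int) := by ring
    have hih := hshift ▸ ih (s + 1)
    by_cases hqa : PySem.List.pyGetD q (PySem.Int.mod s (q.length : Int)) 0 = a
    · rw [if_pos (by simpa [hmod] using hqa), if_pos (by simpa using hqa)]
      simp only [List.length_cons, hih]
    · rw [if_neg (by simpa [hmod] using hqa), if_neg (by simpa using hqa)]
      exact hih

theorem zip_take_len : ∀ (p xs : List Int), p.zip (xs.take p.length) = p.zip xs := by
  intro p
  induction p with
  | nil => intro xs; simp
  | cons b p' ih =>
    intro xs
    cases xs with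
    | nil => simp
    | cons x xs' => simp [List.zip_cons_cons, ih xs']

-- one chunk of the modular count
theorem scoreOf_chunk (pat xs : List Int) (hp : pat ≠ []) :
    scoreOf pat xs = zipCount pat xs + scoreOf pat (xs.drop pat.length) := by
  have hzip : pat.zip (xs.take pat.length) = pat.zip xs := zip_take_len pat xs
  unfold scoreOf
  conv_lhs => rw [← List.take_append_drop pat.length xs]
  rw [PySem.List.enumerate_append, List.filter_append, List.length_append]
  push_cast
  congr 1
  · have ht := take_part pat (xs.take pat.length) 0 (by simp)
    simp only [Nat.cast_zero, List.drop_zero] at ht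
    rw [zipCount_eq, hzip.symm]
    exact_mod_cast ht
  · by_cases hlen : xs.length ≤ pat.length
    · simp [List.drop_eq_nil_of_le hlen, PySem.List.enumerate_nil]
    · have htl : ((xs.take pat.length).length : Int) = (pat.length : Int) := by
        simp; omega
      rw [htl]
      exact_mod_cast shift_part pat hp (xs.drop pat.length) 0

theorem scoreOf_eq_countChunks (pat : List Int) (hp : pat ≠ []) (xs : List Int) :
    scoreOf pat xs = countChunks pat xs := by
  have H : ∀ n (ys : List Int), ys.length ≤ n → scoreOf pat ys = countChunks pat ys := by
    intro n
    induction n with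
    | zero =>
      intro ys h
      have : ys = [] := List.eq_nil_of_length_eq_zero (by omega)
      subst this
      rw [countChunks]
      simp [scoreOf, PySem.List.enumerate_nil]
    | succ n ih =>
      intro ys h
      by_cases hy : ys = []
      · subst hy
        rw [countChunks]
        simp [scoreOf, PySem.List.enumerate_nil]
      · rw [countChunks, if_neg hy, if_neg hp, PySem.List.slice_from_natCast,
          scoreOf_chunk pat ys hp]
        congr 1
        apply ih
        have hy1 : 0 < ys.length := List.length_pos_iff.mpr hy
        have hp1 : 0 < pat.length := List.length_pos_iff.mpr hp
        simp only [List.length_drop]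
        omega
  exact H xs.length xs le_rfl

theorem select3 (c1 c2 c3 m : Int) :
    ([(0 : Int), 1, 2].foldl
      (fun ans j => if PySem.List.pyGetD [c1, c2, c3] j 0 = m then ans ++ [j + 1] else ans) [])
    = ((PySem.List.enumerate [c1, c2, c3] 0).filter (fun ks => ks.2 = m)).map (fun ks => ks.1 + 1) := by
  simp only [List.foldl_cons, List.foldl_nil, PySem.List.enumerate_cons, PySem.List.enumerate_nil,
    List.filter_cons, List.filter_nil, decide_eq_true_eq,
    show PySem.List.pyGetD [c1, c2, c3] 0 0 = c1 by
      simp [PySem.List.pyGetD, PySem.List.pyGet?, PySem.List.pyIdx?],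
    show PySem.List.pyGetD [c1, c2, c3] 1 0 = c2 by
      simp [PySem.List.pyGetD, PySem.List.pyGet?, PySem.List.pyIdx?],
    show PySem.List.pyGetD [c1, c2, c3] 2 0 = c3 by
      simp [PySem.List.pyGetD, PySem.List.pyGet?, PySem.List.pyIdx?]]
  split_ifs <;> simp

theorem solution_eq_alt (answers : List Int) : solution answers = solution_alt answers := by
  unfold solution solution_alt
  simp only []
  rw [loop_count]
  simp only [zero_add, List.foldl_cons, List.foldl_nil, List.nil_append, List.cons_append,
    scoreOf_eq_countChunks [1, 2, 3, 4, 5] (by simp),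
    scoreOf_eq_countChunks [2, 1, 2, 3, 2, 4, 2, 5] (by simp),
    scoreOf_eq_countChunks [3, 3, 1, 1, 2, 2, 4, 4, 5, 5] (by simp)]
  rw [show PySem.List.pyRange 0 3 1 = [0, 1, 2] from by decide]
  exact select3 _ _ _ _

-- ===== VERDICT (by name: the statement is the Claim_ definition above) =====
theorem solution_spec : Claim_equal_solution := by
  intro answers _
  unfold Spec_solution
  exact solution_eq_alt answers
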